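-- pv_equiv track=rewrite | github.com/AbhilekhGulpadia/yfinanceScreener | app.py | _pick_best_column
-- ===== SOURCE A (Python) =====
-- def _pick_best_column(columns, base: str, symbol: str):
--     cols = list(columns)
--     sym_key = (symbol or "").lower().replace(".", "_").replace("-", "_")
--     priorities = [base, f"{base}_{sym_key}", f"{sym_key}_{base}"]
--     for p in priorities:
--         if p in cols:
--             return p
--     for c in cols:
--         if c.endswith("_" + base):
--             return c
--     for c in cols:
--         if base in c:
--             return c
--     return None
-- ===== SOURCE B (Python) =====
-- def _pick_best_column(columns, base: str, symbol: str):
--     cols = list(columns)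
--     sym_key = (symbol or "").lower().replace(".", "_").replace("-", "_")
--     priorities = [base, f"{base}_{sym_key}", f"{sym_key}_{base}"]
--     for p in priorities:
--         if p in cols:
--             return p
--     fallback = None
--     for c in cols:
--         if c.endswith("_" + base):
--             return c
--         if fallback is None and base in c:
--             fallback = c
--     return fallback
-- ===== Notes on version B (the rewrite author's own statement) =====
-- stated objective: alternative
-- what changed: A's two trailing full scans (first suffix match, then first substring match) are merged into one traversal that returns a suffix match immediately and otherwise remembers the first substring match as a fallback; the priority checks are unchanged.
import Mathlib
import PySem

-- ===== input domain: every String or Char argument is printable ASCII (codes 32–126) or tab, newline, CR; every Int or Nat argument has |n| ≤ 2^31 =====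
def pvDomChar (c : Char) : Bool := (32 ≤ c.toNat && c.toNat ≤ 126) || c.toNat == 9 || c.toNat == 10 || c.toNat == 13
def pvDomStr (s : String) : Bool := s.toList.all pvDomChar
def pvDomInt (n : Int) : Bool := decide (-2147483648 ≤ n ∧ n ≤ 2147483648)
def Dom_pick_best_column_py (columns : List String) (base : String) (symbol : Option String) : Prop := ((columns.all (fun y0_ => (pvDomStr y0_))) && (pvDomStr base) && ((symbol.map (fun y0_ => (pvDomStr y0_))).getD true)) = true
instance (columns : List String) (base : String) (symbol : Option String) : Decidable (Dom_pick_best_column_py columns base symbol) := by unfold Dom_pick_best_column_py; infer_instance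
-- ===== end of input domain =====

-- B merges A's two trailing scans (suffix match, then substring match) into one pass
-- that keeps a pending substring fallback; objective: alternative decomposition, same cost.


-- ===== PORT A =====
-- sym_key = (symbol or "").lower().replace(".", "_").replace("-", "_")
def pvSymKey (symbol : Option String) : String :=
  PySem.Str.replace (PySem.Str.replace (PySem.Str.lower (symbol.getD "")) "." "_") "-" "_"

def pick_best_column_py (columns : List String) (base : String) (symbol : Option String) : Option String :=
  let cols := columns
  let sym_key := pvSymKey symbol
  let priorities := [base, base ++ "_" ++ sym_key, sym_key ++ "_" ++ base]
  match priorities.find? (fun p => cols.contains p) with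
  | some p => some p
  | none =>
    match cols.find? (fun c => PySem.Str.endswith c ("_" ++ base)) with
    | some c => some c
    | none => cols.find? (fun c => PySem.Str.isIn base c)

-- ===== PORT B =====
-- one pass: a suffix match returns at once; the first mere substring match is kept as fallback
def pvScan (cols : List String) (base : String) (fallback : Option String) : Option String :=
  match cols with
  | [] => fallback
  | c :: rest =>
    if PySem.Str.endswith c ("_" ++ base) then some c
    else if fallback.isNone && PySem.Str.isIn base c then pvScan rest base (some c)
    else pvScan rest base fallback

def pick_best_column_py_alt (columns : List String) (base : String) (symbol : Option String) : Option String :=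
  let cols := columns
  let sym_key := pvSymKey symbol
  let priorities := [base, base ++ "_" ++ sym_key, sym_key ++ "_" ++ base]
  match priorities.find? (fun p => cols.contains p) with
  | some p => some p
  | none => pvScan cols base none

-- ===== PRECONDITION & SPEC =====
def Spec_pick_best_column_py (columns : List String) (base : String) (symbol : Option String) (out : Option String) : Prop := out = pick_best_column_py_alt columns base symbol
instance (columns : List String) (base : String) (symbol : Option String) (out : Option String) : Decidable (Spec_pick_best_column_py columns base symbol out) := by unfold Spec_pick_best_column_py; infer_instance

-- ===== CLAIM (what is proved, stated in full; the proofs are below) =====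
def Claim_equal_pick_best_column_py : Prop := ∀ (columns : List String) (base : String) (symbol : Option String), Dom_pick_best_column_py columns base symbol → Spec_pick_best_column_py columns base symbol (pick_best_column_py columns base symbol)

-- ===== LEMMAS AND PROOFS =====
theorem pvScan_eq (cols : List String) (base : String) (fb : Option String) :
    pvScan cols base fb =
      match cols.find? (fun c => PySem.Str.endswith c ("_" ++ base)) with
      | some c => some c
      | none =>
        match fb with
        | some f => some f
        | none => cols.find? (fun c => PySem.Str.isIn base c) := by
  induction cols generalizing fb with
  | nil => cases fb <;> simp [pvScan]
  | cons c rest ih =>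
    by_cases hs : PySem.Str.endswith c ("_" ++ base) <;> simp at hs
    · simp [pvScan, hs, List.find?]
    · cases fb with
      | some f => simp [pvScan, hs, List.find?, ih]
      | none =>
        by_cases hi : PySem.Str.isIn base c <;> simp at hi
        · simp [pvScan, hs, hi, List.find?, ih]
        · simp [pvScan, hs, hi, List.find?, ih]

-- ===== VERDICT (by name: the statement is the Claim_ definition above) =====
theorem pick_best_column_py_spec : Claim_equal_pick_best_column_py := by
  intro columns base symbol _
  unfold Spec_pick_best_column_py pick_best_column_py pick_best_column_py_alt
  simp only [pvScan_eq]
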